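-- pv_equiv track=rewrite | github.com/RavindharCYS/Image-Extractor | src/core/file_handler.py | _categorize_metadata
-- ===== SOURCE A (Python) =====
-- from typing import Dict, Any, List, Optional, Union, BinaryIO, TextIO
--
-- def _categorize_metadata(metadata: Dict[str, Any]) -> Dict[str, Dict[str, Any]]:
--     """
--     Categorize metadata into logical groups.
--
--     Args:
--         metadata: Dictionary containing metadata
--
--     Returns:
--         Dictionary with categorized metadata
--     """
--     categories = {
--         'Basic Information': {},
--         'Camera Information': {},
--         'Lens Information': {},
--         'Exposure Information': {},
--         'GPS Information': {},
--         'EXIF Data': {},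
--         'IPTC Data': {},
--         'XMP Data': {},
--         'File Information': {},
--         'Other Metadata': {}
--     }
--
--     # Skip these keys as they're handled separately
--     skip_keys = ['PrivacyAssessment']
--
--     for key, value in metadata.items():
--         if key in skip_keys:
--             continue
--
--         # File information
--         if key.startswith('File') or key in ['FileName', 'FilePath', 'FileSize', 'FileSizeFormatted']:
--             categories['File Information'][key] = value
--
--         # Basic information
--         elif key in ['ImageWidth', 'ImageHeight', 'ImageSize', 'Megapixels', 'AspectRatio', 'ColorSpace', 'BitsPerPixel']:
--             categories['Basic Information'][key] = value
--
--         # Camera information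
--         elif key in ['Make', 'Model', 'DeviceMake', 'DeviceModel', 'DeviceType', 'Software', 'CameraSerialNumber', 'DeviceSerialNumber']:
--             categories['Camera Information'][key] = value
--
--         # Lens information
--         elif 'Lens' in key or key in ['FocalLength', 'FocalLength35mm']:
--             categories['Lens Information'][key] = value
--
--         # Exposure information
--         elif key in ['Aperture', 'ShutterSpeed', 'ISO', 'ExposureTime', 'ExposureProgram', 'ExposureMode', 'ExposureCompensation', 'MeteringMode', 'Flash', 'WhiteBalance']:
--             categories['Exposure Information'][key] = value
--
--         # GPS information
--         elif key.startswith('GPS') or key in ['Latitude', 'Longitude', 'Altitude', 'Location', 'LocationName', 'City', 'State', 'Country']: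
--             categories['GPS Information'][key] = value
--
--         # EXIF data
--         elif key.startswith('EXIF:') or key.startswith('EXIF'):
--             categories['EXIF Data'][key] = value
--
--         # IPTC data
--         elif key.startswith('IPTC:') or key.startswith('IPTC'):
--             categories['IPTC Data'][key] = value
--
--         # XMP data
--         elif key.startswith('XMP:') or key.startswith('XMP'):
--             categories['XMP Data'][key] = value
--
--         # Other metadata
--         else:
--             categories['Other Metadata'][key] = value
--
--     # Remove empty categories
--     return {k: v for k, v in categories.items() if v}
-- ===== SOURCE B (Python) =====
-- def _categorize_metadata(metadata):
--     """Categorize metadata by grouping keys per category (category-outer traversal)."""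
--     RULES = [
--         ('File Information', lambda k: k.startswith('File')),
--         ('Basic Information', lambda k: k in {'ImageWidth', 'ImageHeight', 'ImageSize', 'Megapixels',
--                                               'AspectRatio', 'ColorSpace', 'BitsPerPixel'}),
--         ('Camera Information', lambda k: k in {'Make', 'Model', 'DeviceMake', 'DeviceModel', 'DeviceType',
--                                                'Software', 'CameraSerialNumber', 'DeviceSerialNumber'}),
--         ('Lens Information', lambda k: 'Lens' in k or k in {'FocalLength', 'FocalLength35mm'}),
--         ('Exposure Information', lambda k: k in {'Aperture', 'ShutterSpeed', 'ISO', 'ExposureTime',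
--                                                  'ExposureProgram', 'ExposureMode', 'ExposureCompensation',
--                                                  'MeteringMode', 'Flash', 'WhiteBalance'}),
--         ('GPS Information', lambda k: k.startswith('GPS') or k in {'Latitude', 'Longitude', 'Altitude',
--                                                                    'Location', 'LocationName', 'City',
--                                                                    'State', 'Country'}),
--         ('EXIF Data', lambda k: k.startswith('EXIF')),
--         ('IPTC Data', lambda k: k.startswith('IPTC')),
--         ('XMP Data', lambda k: k.startswith('XMP')),
--     ]
--     ORDER = ['Basic Information', 'Camera Information', 'Lens Information', 'Exposure Information',
--              'GPS Information', 'EXIF Data', 'IPTC Data', 'XMP Data', 'File Information', 'Other Metadata']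
--
--     def label(key):
--         return next((name for name, pred in RULES if pred(key)), 'Other Metadata')
--
--     labeled = [(label(k), k, v) for k, v in metadata.items() if k != 'PrivacyAssessment']
--     return {cat: group for cat in ORDER
--             if (group := {k: v for c, k, v in labeled if c == cat})}
-- ===== Notes on version B (the rewrite author's own statement) =====
-- stated objective: alternative
-- what changed: A threads one key-outer pass through an if/elif chain that mutates per-category sub-dicts in a pre-initialized dict; B classifies each key once via an ordered (category, predicate) rule table with a default, then builds the output category-outer, one comprehension per category in the fixed label order, keeping only non-empty groups.
import Mathlib
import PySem

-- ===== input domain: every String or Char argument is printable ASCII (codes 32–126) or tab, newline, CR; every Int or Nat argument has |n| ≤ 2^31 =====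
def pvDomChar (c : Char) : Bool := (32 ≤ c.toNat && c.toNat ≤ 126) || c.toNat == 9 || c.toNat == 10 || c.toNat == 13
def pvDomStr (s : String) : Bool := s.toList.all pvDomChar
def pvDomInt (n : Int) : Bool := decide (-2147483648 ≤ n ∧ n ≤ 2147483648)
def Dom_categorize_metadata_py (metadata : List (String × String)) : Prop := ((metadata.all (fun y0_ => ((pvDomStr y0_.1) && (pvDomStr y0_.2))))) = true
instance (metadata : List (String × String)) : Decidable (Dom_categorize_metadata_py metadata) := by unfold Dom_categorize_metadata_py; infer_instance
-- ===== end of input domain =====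

-- B replaces A's key-outer pass with inline if/elif bucketing by a rule table plus a
-- category-outer grouping pass (one comprehension per category); objective: alternative.

-- shared decoding of the dict-typed argument (type convention: the assoc list stands for the
-- Python dict, built in insertion order with overwrite-in-place)
def pvMetaItems (metadata : List (String × String)) : List (String × String) :=
  (PySem.Dict.ofList metadata).items

-- ===== PORT A =====
def pvSkipKeys : List String := ["PrivacyAssessment"]
def pvFileKeys : List String := ["FileName", "FilePath", "FileSize", "FileSizeFormatted"]
def pvBasicKeys : List String := ["ImageWidth", "ImageHeight", "ImageSize", "Megapixels", "AspectRatio", "ColorSpace", "BitsPerPixel"]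
def pvCameraKeys : List String := ["Make", "Model", "DeviceMake", "DeviceModel", "DeviceType", "Software", "CameraSerialNumber", "DeviceSerialNumber"]
def pvFocalKeys : List String := ["FocalLength", "FocalLength35mm"]
def pvExposureKeys : List String := ["Aperture", "ShutterSpeed", "ISO", "ExposureTime", "ExposureProgram", "ExposureMode", "ExposureCompensation", "MeteringMode", "Flash", "WhiteBalance"]
def pvGpsKeys : List String := ["Latitude", "Longitude", "Altitude", "Location", "LocationName", "City", "State", "Country"]

def pvInitCats : PySem.Dict String (PySem.Dict String String) :=
  PySem.Dict.ofList
    [("Basic Information", PySem.Dict.empty), ("Camera Information", PySem.Dict.empty),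
     ("Lens Information", PySem.Dict.empty), ("Exposure Information", PySem.Dict.empty),
     ("GPS Information", PySem.Dict.empty), ("EXIF Data", PySem.Dict.empty),
     ("IPTC Data", PySem.Dict.empty), ("XMP Data", PySem.Dict.empty),
     ("File Information", PySem.Dict.empty), ("Other Metadata", PySem.Dict.empty)]

-- the body of A's `for key, value in metadata.items()` loop (kv.1 = key, kv.2 = value)
def pvStepA (categories : PySem.Dict String (PySem.Dict String String)) (kv : String × String) :
    PySem.Dict String (PySem.Dict String String) :=
  if kv.1 ∈ pvSkipKeys then categories
  else if PySem.Str.startswith kv.1 "File" = true ∨ kv.1 ∈ pvFileKeys then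
    categories.modify "File Information" PySem.Dict.empty (fun d => d.insert kv.1 kv.2)
  else if kv.1 ∈ pvBasicKeys then
    categories.modify "Basic Information" PySem.Dict.empty (fun d => d.insert kv.1 kv.2)
  else if kv.1 ∈ pvCameraKeys then
    categories.modify "Camera Information" PySem.Dict.empty (fun d => d.insert kv.1 kv.2)
  else if PySem.Str.isIn "Lens" kv.1 = true ∨ kv.1 ∈ pvFocalKeys then
    categories.modify "Lens Information" PySem.Dict.empty (fun d => d.insert kv.1 kv.2)
  else if kv.1 ∈ pvExposureKeys then
    categories.modify "Exposure Information" PySem.Dict.empty (fun d => d.insert kv.1 kv.2)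
  else if PySem.Str.startswith kv.1 "GPS" = true ∨ kv.1 ∈ pvGpsKeys then
    categories.modify "GPS Information" PySem.Dict.empty (fun d => d.insert kv.1 kv.2)
  else if PySem.Str.startswith kv.1 "EXIF:" = true ∨ PySem.Str.startswith kv.1 "EXIF" = true then
    categories.modify "EXIF Data" PySem.Dict.empty (fun d => d.insert kv.1 kv.2)
  else if PySem.Str.startswith kv.1 "IPTC:" = true ∨ PySem.Str.startswith kv.1 "IPTC" = true then
    categories.modify "IPTC Data" PySem.Dict.empty (fun d => d.insert kv.1 kv.2)
  else if PySem.Str.startswith kv.1 "XMP:" = true ∨ PySem.Str.startswith kv.1 "XMP" = true then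
    categories.modify "XMP Data" PySem.Dict.empty (fun d => d.insert kv.1 kv.2)
  else
    categories.modify "Other Metadata" PySem.Dict.empty (fun d => d.insert kv.1 kv.2)

def categorize_metadata_py (metadata : List (String × String)) : List (String × List (String × String)) :=
  let categories := (pvMetaItems metadata).foldl pvStepA pvInitCats
  -- `{k: v for k, v in categories.items() if v}` (keys already distinct and in order)
  (categories.items.filter (fun kv => !kv.2.items.isEmpty)).map (fun kv => (kv.1, kv.2.items))

-- ===== PORT B =====
def pvRulesB : List (String × (String → Bool)) :=
  [("File Information", fun k => PySem.Str.startswith k "File"),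
   ("Basic Information", fun k => decide (k ∈ pvBasicKeys)),
   ("Camera Information", fun k => decide (k ∈ pvCameraKeys)),
   ("Lens Information", fun k => PySem.Str.isIn "Lens" k || decide (k ∈ pvFocalKeys)),
   ("Exposure Information", fun k => decide (k ∈ pvExposureKeys)),
   ("GPS Information", fun k => PySem.Str.startswith k "GPS" || decide (k ∈ pvGpsKeys)),
   ("EXIF Data", fun k => PySem.Str.startswith k "EXIF"),
   ("IPTC Data", fun k => PySem.Str.startswith k "IPTC"),
   ("XMP Data", fun k => PySem.Str.startswith k "XMP")]

def pvOrderB : List String :=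
  ["Basic Information", "Camera Information", "Lens Information", "Exposure Information",
   "GPS Information", "EXIF Data", "IPTC Data", "XMP Data", "File Information", "Other Metadata"]

-- `next((name for name, pred in RULES if pred(key)), 'Other Metadata')`
def pvLabelB (key : String) : String :=
  ((pvRulesB.find? (fun r => r.2 key)).map (fun r => r.1)).getD "Other Metadata"

def categorize_metadata_py_alt (metadata : List (String × String)) : List (String × List (String × String)) :=
  let labeled := ((pvMetaItems metadata).filter (fun kv => kv.1 != "PrivacyAssessment")).map
      (fun kv => (pvLabelB kv.1, kv.1, kv.2))
  -- outer dict comprehension over the ten distinct category names = filterMap in ORDER's order;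
  -- inner dict comprehension = insert each matching (k, v) into a fresh dict
  pvOrderB.filterMap (fun cat =>
    let group := ((labeled.filter (fun t => t.1 == cat)).foldl
        (fun d t => d.insert t.2.1 t.2.2) PySem.Dict.empty).items
    if group.isEmpty = true then none else some (cat, group))

-- ===== PRECONDITION & SPEC =====
def Spec_categorize_metadata_py (metadata : List (String × String)) (out : List (String × List (String × String))) : Prop := out = categorize_metadata_py_alt metadata
instance (metadata : List (String × String)) (out : List (String × List (String × String))) : Decidable (Spec_categorize_metadata_py metadata out) := by unfold Spec_categorize_metadata_py; infer_instance

-- ===== CLAIM (what is proved, stated in full; the proofs are below) =====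
def Claim_equal_categorize_metadata_py : Prop := ∀ (metadata : List (String × String)), Dom_categorize_metadata_py metadata → Spec_categorize_metadata_py metadata (categorize_metadata_py metadata)

-- ===== LEMMAS AND PROOFS =====

-- A's chain, factored as the category it selects (proof-side characterisation of pvStepA)
def pvChainCat (key : String) : String :=
  if PySem.Str.startswith key "File" = true ∨ key ∈ pvFileKeys then "File Information"
  else if key ∈ pvBasicKeys then "Basic Information"
  else if key ∈ pvCameraKeys then "Camera Information"
  else if PySem.Str.isIn "Lens" key = true ∨ key ∈ pvFocalKeys then "Lens Information"
  else if key ∈ pvExposureKeys then "Exposure Information"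
  else if PySem.Str.startswith key "GPS" = true ∨ key ∈ pvGpsKeys then "GPS Information"
  else if PySem.Str.startswith key "EXIF:" = true ∨ PySem.Str.startswith key "EXIF" = true then "EXIF Data"
  else if PySem.Str.startswith key "IPTC:" = true ∨ PySem.Str.startswith key "IPTC" = true then "IPTC Data"
  else if PySem.Str.startswith key "XMP:" = true ∨ PySem.Str.startswith key "XMP" = true then "XMP Data"
  else "Other Metadata"

def pvF (g : String → PySem.Dict String String) : PySem.Dict String (PySem.Dict String String) :=
  PySem.Dict.mk (pvOrderB.map (fun c => (c, g c)))

def pvStepC (c : String) (d : PySem.Dict String String) (kv : String × String) :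
    PySem.Dict String String :=
  if kv.1 ∈ pvSkipKeys then d
  else if pvChainCat kv.1 = c then d.insert kv.1 kv.2 else d

theorem pv_startswith_weaken (s p q : String) (h : q.toList <+: p.toList)
    (h2 : PySem.Str.startswith s p = true) : PySem.Str.startswith s q = true := by
  rw [PySem.Str.startswith_eq] at *
  rw [PySem.Chars.startswith_iff] at *
  exact h.trans h2

theorem pv_mem_file_startswith (key : String) (h : key ∈ pvFileKeys) :
    PySem.Str.startswith key "File" = true := by
  fin_cases h <;> decide

theorem pv_chain_eq_label (key : String) : pvChainCat key = pvLabelB key := by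
  have hFmem := pv_mem_file_startswith key
  have hE := pv_startswith_weaken key "EXIF:" "EXIF" (by decide)
  have hI := pv_startswith_weaken key "IPTC:" "IPTC" (by decide)
  have hX := pv_startswith_weaken key "XMP:" "XMP" (by decide)
  unfold pvChainCat pvLabelB pvRulesB
  by_cases h1 : PySem.Str.startswith key "File" = true
  · simp_all [List.find?]
  · have h1' : key ∉ pvFileKeys := fun hm => h1 (hFmem hm)
    by_cases h2 : key ∈ pvBasicKeys
    · simp_all [List.find?]
    · by_cases h3 : key ∈ pvCameraKeys
      · simp_all [List.find?]
      · by_cases h4 : PySem.Str.isIn "Lens" key = true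
        · simp_all [List.find?]
        · by_cases h4b : key ∈ pvFocalKeys
          · simp_all [List.find?]
          · by_cases h5 : key ∈ pvExposureKeys
            · simp_all [List.find?]
            · by_cases h6 : PySem.Str.startswith key "GPS" = true
              · simp_all [List.find?]
              · by_cases h6b : key ∈ pvGpsKeys
                · simp_all [List.find?]
                · by_cases h7 : PySem.Str.startswith key "EXIF" = true
                  · simp_all [List.find?]
                  · have h7' : ¬ PySem.Str.startswith key "EXIF:" = true := fun h => h7 (hE h)
                    by_cases h8 : PySem.Str.startswith key "IPTC" = true
                    · simp_all [List.find?]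
                    · have h8' : ¬ PySem.Str.startswith key "IPTC:" = true := fun h => h8 (hI h)
                      by_cases h9 : PySem.Str.startswith key "XMP" = true
                      · simp_all [List.find?]
                      · have h9' : ¬ PySem.Str.startswith key "XMP:" = true := fun h => h9 (hX h)
                        simp_all [List.find?]

theorem pv_modify_F (g : String → PySem.Dict String String) (c0 : String) (hc0 : c0 ∈ pvOrderB)
    (k v : String) :
    (pvF g).modify c0 PySem.Dict.empty (fun d => d.insert k v)
      = pvF (fun c => if c0 = c then (g c).insert k v else g c) := by
  fin_cases hc0 <;>
    simp [pvF, pvOrderB, PySem.Dict.modify, PySem.Dict.insert, PySem.Dict.getD,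
      PySem.Dict.get?, PySem.Dict.contains, List.find?]

theorem pv_stepA_F (g : String → PySem.Dict String String) (kv : String × String) :
    pvStepA (pvF g) kv = pvF (fun c => pvStepC c (g c) kv) := by
  unfold pvStepA pvStepC
  split_ifs with h0 h1 h2 h3 h4 h5 h6 h7 h8 h9
  · rfl
  · have hl : pvChainCat kv.1 = "File Information" := by
      unfold pvChainCat; rw [if_pos h1]
    simp only [hl]
    exact pv_modify_F g _ (by decide) kv.1 kv.2
  · have hl : pvChainCat kv.1 = "Basic Information" := by
      unfold pvChainCat; rw [if_neg h1, if_pos h2]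
    simp only [hl]
    exact pv_modify_F g _ (by decide) kv.1 kv.2
  · have hl : pvChainCat kv.1 = "Camera Information" := by
      unfold pvChainCat; rw [if_neg h1, if_neg h2, if_pos h3]
    simp only [hl]
    exact pv_modify_F g _ (by decide) kv.1 kv.2
  · have hl : pvChainCat kv.1 = "Lens Information" := by
      unfold pvChainCat; rw [if_neg h1, if_neg h2, if_neg h3, if_pos h4]
    simp only [hl]
    exact pv_modify_F g _ (by decide) kv.1 kv.2
  · have hl : pvChainCat kv.1 = "Exposure Information" := by
      unfold pvChainCat; rw [if_neg h1, if_neg h2, if_neg h3, if_neg h4, if_pos h5]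
    simp only [hl]
    exact pv_modify_F g _ (by decide) kv.1 kv.2
  · have hl : pvChainCat kv.1 = "GPS Information" := by
      unfold pvChainCat; rw [if_neg h1, if_neg h2, if_neg h3, if_neg h4, if_neg h5, if_pos h6]
    simp only [hl]
    exact pv_modify_F g _ (by decide) kv.1 kv.2
  · have hl : pvChainCat kv.1 = "EXIF Data" := by
      unfold pvChainCat; rw [if_neg h1, if_neg h2, if_neg h3, if_neg h4, if_neg h5, if_neg h6, if_pos h7]
    simp only [hl]
    exact pv_modify_F g _ (by decide) kv.1 kv.2
  · have hl : pvChainCat kv.1 = "IPTC Data" := by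
      unfold pvChainCat; rw [if_neg h1, if_neg h2, if_neg h3, if_neg h4, if_neg h5, if_neg h6, if_neg h7, if_pos h8]
    simp only [hl]
    exact pv_modify_F g _ (by decide) kv.1 kv.2
  · have hl : pvChainCat kv.1 = "XMP Data" := by
      unfold pvChainCat; rw [if_neg h1, if_neg h2, if_neg h3, if_neg h4, if_neg h5, if_neg h6, if_neg h7, if_neg h8, if_pos h9]
    simp only [hl]
    exact pv_modify_F g _ (by decide) kv.1 kv.2
  · have hl : pvChainCat kv.1 = "Other Metadata" := by
      unfold pvChainCat; rw [if_neg h1, if_neg h2, if_neg h3, if_neg h4, if_neg h5, if_neg h6, if_neg h7, if_neg h8, if_neg h9]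
    simp only [hl]
    exact pv_modify_F g _ (by decide) kv.1 kv.2

theorem pv_foldl_stepA (items : List (String × String)) :
    ∀ g, items.foldl pvStepA (pvF g) = pvF (fun c => items.foldl (pvStepC c) (g c)) := by
  induction items with
  | nil => intro g; rfl
  | cons kv rest ih =>
    intro g
    simp only [List.foldl_cons]
    rw [pv_stepA_F, ih]

theorem pv_group_eq (items : List (String × String)) (c : String) :
    ((((items.filter (fun kv => kv.1 != "PrivacyAssessment")).map
          (fun kv => (pvChainCat kv.1, kv.1, kv.2))).filter (fun t => t.1 == c)).foldl
        (fun d t => d.insert t.2.1 t.2.2) PySem.Dict.empty)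
      = items.foldl (pvStepC c) PySem.Dict.empty := by
  rw [List.filter_map, List.foldl_map, List.foldl_filter, List.foldl_filter]
  congr 1
  funext d kv
  by_cases h1 : kv.1 = "PrivacyAssessment" <;> by_cases h2 : pvChainCat kv.1 = c <;>
    simp [pvStepC, pvSkipKeys, h1, h2]

theorem pv_assemble (names : List String) (D : String → PySem.Dict String String) :
    ((names.map (fun c => (c, D c))).filter (fun kv => !kv.2.items.isEmpty)).map
        (fun kv => (kv.1, kv.2.items))
      = names.filterMap (fun c =>
          if ((D c).items).isEmpty = true then none else some (c, (D c).items)) := by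
  induction names with
  | nil => rfl
  | cons c cs ih =>
    simp only [List.map_cons, List.filter_cons, List.filterMap_cons]
    by_cases h : ((D c).items).isEmpty = true <;> simp [h, ih]

-- ===== VERDICT (by name: the statement is the Claim_ definition above) =====
theorem categorize_metadata_py_spec : Claim_equal_categorize_metadata_py := by
  intro metadata _
  unfold Spec_categorize_metadata_py categorize_metadata_py categorize_metadata_py_alt
  have hinit : pvInitCats = pvF (fun _ => PySem.Dict.empty) := by decide
  rw [hinit, pv_foldl_stepA]
  dsimp only
  have hitems : (pvF (fun c => (pvMetaItems metadata).foldl (pvStepC c) PySem.Dict.empty)).items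
      = pvOrderB.map (fun c => (c, (pvMetaItems metadata).foldl (pvStepC c) PySem.Dict.empty)) := rfl
  rw [hitems, pv_assemble]
  refine congrArg (fun f => List.filterMap f pvOrderB) (funext fun c => ?_)
  simp only [← pv_chain_eq_label, pv_group_eq]
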